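-- pv_equiv track=rewrite | github.com/vintagevikas090/Programming_InterviewBit | Strings/vowel_and_consonants_substrings.py | solve
-- ===== SOURCE A (Python) =====
-- def solve(string):
--     n = len(string)
--     mod = 10**9 + 7
--     if n == 0 or n == 1:
--         return 0
--     vowel = 'aeiou'
--     vowel_count, cons_count, ans = 0, 0, 0
--     for char in string:
--         if char in vowel:
--             ans += cons_count
--             vowel_count += 1
--         else:
--             ans += vowel_count
--             cons_count += 1
--
--     return ans % mod
-- ===== SOURCE B (Python) =====
-- def solve(string):
--     v = sum(ch in 'aeiou' for ch in string)
--     return v * (len(string) - v) % (10**9 + 7)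
-- ===== Notes on version B (the rewrite author's own statement) =====
-- stated objective: simpler
-- what changed: Replaces the running-pair accumulation loop with a closed form: count the vowels v and return v*(n-v) mod 1e9+7, since every vowel-consonant pair contributes exactly one substring.
import Mathlib
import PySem

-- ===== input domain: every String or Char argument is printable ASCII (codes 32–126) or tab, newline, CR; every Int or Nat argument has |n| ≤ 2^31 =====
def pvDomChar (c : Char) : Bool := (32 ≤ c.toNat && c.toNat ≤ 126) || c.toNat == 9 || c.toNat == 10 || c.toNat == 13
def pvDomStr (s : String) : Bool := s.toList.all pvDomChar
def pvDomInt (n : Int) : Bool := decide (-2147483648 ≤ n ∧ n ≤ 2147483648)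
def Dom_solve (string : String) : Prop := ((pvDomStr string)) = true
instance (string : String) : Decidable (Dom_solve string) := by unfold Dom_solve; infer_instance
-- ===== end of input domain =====

-- B replaces A's running-pair accumulation loop with the closed form v*(n-v) mod 1e9+7 (v = vowel count); objective: simpler.

-- ===== PORT A =====
-- A's loop state (vowel_count, cons_count, ans); branch order as in the Python.
def solveStep (st : Int × Int × Int) (char : Char) : Int × Int × Int :=
  if ("aeiou".toList.contains char) then
    (st.1 + 1, st.2.1, st.2.2 + st.2.1)
  else
    (st.1, st.2.1 + 1, st.2.2 + st.1)

def solve (string : String) : Int :=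
  let n : Int := (string.toList.length : Int)
  let mod : Int := 10 ^ 9 + 7
  if n = 0 ∨ n = 1 then 0
  else
    let r := string.toList.foldl solveStep (0, 0, 0)
    PySem.Int.mod r.2.2 mod

-- ===== PORT B =====
def solve_alt (string : String) : Int :=
  let v : Int := ((string.toList.countP (fun ch => "aeiou".toList.contains ch) : Nat) : Int)
  PySem.Int.mod (v * ((string.toList.length : Int) - v)) (10 ^ 9 + 7)

-- ===== PRECONDITION & SPEC =====
def Spec_solve (string : String) (out : Int) : Prop := out = solve_alt string
instance (string : String) (out : Int) : Decidable (Spec_solve string out) := by unfold Spec_solve; infer_instance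

-- ===== CLAIM (what is proved, stated in full; the proofs are below) =====
def Claim_equal_solve : Prop := ∀ (string : String), Dom_solve string → Spec_solve string (solve string)

-- ===== LEMMAS AND PROOFS =====

-- Loop invariant: starting from (vc, cc, vc*cc), A's fold ends at (vc', cc', vc'*cc')
-- with vc' = vc + vowels of l and cc' = cc + non-vowels of l.
theorem solveStep_foldl (l : List Char) : ∀ (vc cc : Int),
    l.foldl solveStep (vc, cc, vc * cc) =
      (vc + ((l.countP (fun ch => "aeiou".toList.contains ch) : Nat) : Int),
       cc + ((l.length : Int) - ((l.countP (fun ch => "aeiou".toList.contains ch) : Nat) : Int)),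
       (vc + ((l.countP (fun ch => "aeiou".toList.contains ch) : Nat) : Int)) *
       (cc + ((l.length : Int) - ((l.countP (fun ch => "aeiou".toList.contains ch) : Nat) : Int)))) := by
  induction l with
  | nil => intro vc cc; simp
  | cons c t ih =>
    intro vc cc
    by_cases h : ("aeiou".toList.contains c) = true
    · have : solveStep (vc, cc, vc * cc) c = (vc + 1, cc, (vc + 1) * cc) := by
        unfold solveStep; rw [if_pos h]; simp only [Prod.mk.injEq]
        exact ⟨trivial, trivial, by ring⟩
      simp only [List.foldl_cons, this, ih (vc + 1) cc, List.countP_cons, h,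
        List.length_cons]
      push_cast
      simp only [Prod.mk.injEq]
      refine ⟨by ring, by ring, by ring⟩
    · have : solveStep (vc, cc, vc * cc) c = (vc, cc + 1, vc * (cc + 1)) := by
        unfold solveStep; rw [if_neg h]; simp only [Prod.mk.injEq]
        exact ⟨trivial, trivial, by ring⟩
      simp only [List.foldl_cons, this, ih vc (cc + 1), List.countP_cons, h,
        List.length_cons]
      push_cast
      simp only [Prod.mk.injEq]
      refine ⟨by ring, by ring, by ring⟩

theorem solve_eq_alt (string : String) : solve string = solve_alt string := by
  unfold solve solve_alt
  have hfold := solveStep_foldl string.toList 0 0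
  simp only [zero_mul] at hfold
  by_cases h : ((string.toList.length : Int) = 0 ∨ (string.toList.length : Int) = 1)
  · -- n ≤ 1: v*(n-v) = 0, so B's mod is 0 as well
    simp only [h, if_true]
    set v : Int := ((string.toList.countP (fun ch => "aeiou".toList.contains ch) : Nat) : Int) with hv
    have hvle : v ≤ (string.toList.length : Int) := by
      rw [hv]; exact_mod_cast List.countP_le_length
    have hv0 : 0 ≤ v := by rw [hv]; positivity
    have : v * ((string.toList.length : Int) - v) = 0 := by
      rcases h with h | h <;> rw [h] at hvle ⊢ <;> nlinarith
    rw [this]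
    simp [PySem.Int.mod]
  · simp only [h, if_false, hfold]
    ring_nf

-- ===== VERDICT (by name: the statement is the Claim_ definition above) =====
theorem solve_spec : Claim_equal_solve := by
  intro string _
  unfold Spec_solve
  exact solve_eq_alt string
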